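-- pv_equiv track=rewrite | github.com/ThinhLam-git/be_demoAPI | api.py | reducts_from_conditions
-- ===== SOURCE A (Python) =====
-- def reducts_from_conditions(attributes, conditions):
--     """Tính reduct nhỏ nhất từ các điều kiện phân biệt."""
--     min_reduct_size = len(attributes)  # Kích thước reduct nhỏ nhất
--     reducts = []
--
--     def satisfies_condition(subset):
--         subset_set = set(subset)
--         return all(
--             any(term.issubset(subset_set) for term in conditions)
--             for term in conditions
--         )
--
--     for size in range(1, len(attributes) + 1):
--         for subset in generate_all_combinations(attributes):
--             if len(subset) == size and satisfies_condition(subset):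
--                 if size < min_reduct_size:
--                     reducts = [set(subset)]
--                     min_reduct_size = size
--                 elif size == min_reduct_size:
--                     reducts.append(set(subset))
--         if reducts:  # Kết thúc ngay khi tìm thấy reduct nhỏ nhất
--             break
--
--     return reducts
--
-- def generate_all_combinations(attributes):
--     """Sinh tất cả các tổ hợp thuộc tính."""
--     combinations = []
--
--     def combine(current, start):
--         if current:
--             combinations.append(current)
--         for i in range(start, len(attributes)):
--             combine(current + [attributes[i]], i + 1)
--
--     combine([], 0)
--     return combinations
-- ===== SOURCE B (Python) =====
-- def reducts_from_conditions(attributes, conditions):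
--     """Smallest satisfying attribute subsets: enumerate combinations per exact
--     size (no 2^n scan) and stop at the first size that yields any."""
--     cond_sets = [set(term) for term in conditions]
--
--     def ok(subset):
--         subset_set = set(subset)
--         return any(t <= subset_set for t in cond_sets) or not cond_sets
--
--     def combos(items, k):
--         if k == 0:
--             return [[]]
--         out = []
--         for i in range(len(items) - k + 1):
--             for rest in combos(items[i + 1:], k - 1):
--                 out.append([items[i]] + rest)
--         return out
--
--     for size in range(1, len(attributes) + 1):
--         found = [set(c) for c in combos(attributes, size) if ok(c)]
--         if found:
--             return found
--     return []
-- ===== Notes on version B (the rewrite author's own statement) =====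
-- stated objective: faster
-- what changed: B enumerates combinations of each exact size (lexicographic per-size recursion) and returns at the first size that yields any result, instead of A's re-enumeration of all 2^n subsets via DFS at every candidate size filtered by length; A's shadowed double loop over conditions is collapsed to a single any() over precomputed condition sets.
import Mathlib
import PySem

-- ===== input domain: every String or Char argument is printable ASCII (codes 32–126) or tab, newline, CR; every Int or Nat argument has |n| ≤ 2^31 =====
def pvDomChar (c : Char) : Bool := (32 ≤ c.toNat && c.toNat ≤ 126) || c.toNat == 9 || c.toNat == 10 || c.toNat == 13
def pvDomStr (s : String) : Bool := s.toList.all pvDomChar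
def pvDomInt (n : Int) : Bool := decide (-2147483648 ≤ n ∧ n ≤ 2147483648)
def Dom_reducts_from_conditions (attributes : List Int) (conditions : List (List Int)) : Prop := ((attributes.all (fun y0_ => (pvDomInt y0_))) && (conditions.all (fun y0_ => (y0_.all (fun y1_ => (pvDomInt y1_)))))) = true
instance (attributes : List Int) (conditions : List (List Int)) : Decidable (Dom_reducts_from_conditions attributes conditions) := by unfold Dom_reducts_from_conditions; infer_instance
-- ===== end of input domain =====

-- ===== PORT A =====
-- B changes the enumeration: per-size combinations with early return instead of
-- an all-subsets DFS re-enumerated and filtered by length at every size (objective: faster).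
-- helper for A: the nested `combine` of generate_all_combinations; combineTailA cur s
-- is the list of combinations emitted by the loop `for i ...: combine(cur+[a_i], i+1)`
-- over the remaining attributes s (DFS pre-order, exactly A's append order).
def combineTailA (cur : List Int) : List Int → List (List Int)
  | [] => []
  | a :: rest => ((cur ++ [a]) :: combineTailA (cur ++ [a]) rest) ++ combineTailA cur rest

-- generate_all_combinations: combine([],0); the empty `current` is never appended.
def generateAllCombinations (attributes : List Int) : List (List Int) :=
  combineTailA [] attributes

-- satisfies_condition as written: the inner generator's `term` SHADOWS the outer one,
-- so the outer all() re-evaluates the same any() once per condition.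
def satisfiesConditionA (conditions : List (List Int)) (subset : List Int) : Bool :=
  let subsetSet : PySem.Set Int := PySem.Set.ofList subset
  conditions.all (fun _ =>
    conditions.any (fun term => PySem.Set.issubset term subsetSet))

-- the body of `for subset in generate_all_combinations(...)`, as a foldl step
def stepA (size : Int) (conditions : List (List Int))
    (st : Int × List (List Int)) (subset : List Int) : Int × List (List Int) :=
  if (subset.length : Int) == size && satisfiesConditionA conditions subset then
    if size < st.1 then (size, [PySem.Set.ofList subset])
    else if size = st.1 then (st.1, st.2 ++ [PySem.Set.ofList subset])
    else st
  else st

-- the outer `for size in range(1, len+1)` with the `if reducts: break`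
def sizesLoopA (attributes : List Int) (conditions : List (List Int)) :
    List Int → Int × List (List Int) → List (List Int)
  | [], st => st.2
  | size :: rest, st =>
    let st' := (generateAllCombinations attributes).foldl (stepA size conditions) st
    if st'.2 ≠ [] then st'.2 else sizesLoopA attributes conditions rest st'

def reducts_from_conditions (attributes : List Int) (conditions : List (List Int)) : List (List Int) :=
  sizesLoopA attributes conditions
    (PySem.List.pyRange 1 ((attributes.length : Int) + 1) 1)
    ((attributes.length : Int), [])

-- ===== PORT B =====
-- combos(items, k): combinations of exact size k, lexicographic by index.
-- items[i] and items[i+1:] are in range for every i of this range, so getD/drop are exact.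
def combosB (items : List Int) : Nat → List (List Int)
  | 0 => [[]]
  | k + 1 =>
    (PySem.List.pyRange 0 ((items.length : Int) - (k + 1) + 1) 1).flatMap
      (fun i => (combosB (items.drop (i.toNat + 1)) k).map
        (fun rest => items.getD i.toNat 0 :: rest))

-- ok(subset): any(t <= set(subset) for t in cond_sets) or not cond_sets
def okB (condSets : List (PySem.Set Int)) (subset : List Int) : Bool :=
  condSets.any (fun t => PySem.Set.issubset t (PySem.Set.ofList subset)) || condSets.isEmpty

-- the `for size in range(1, len+1)` loop with its early `return found`
def sizesLoopB (attributes : List Int) (condSets : List (PySem.Set Int)) :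
    List Int → List (List Int)
  | [] => []
  | size :: rest =>
    let found := ((combosB attributes size.toNat).filter (okB condSets)).map PySem.Set.ofList
    if found ≠ [] then found else sizesLoopB attributes condSets rest

def reducts_from_conditions_alt (attributes : List Int) (conditions : List (List Int)) : List (List Int) :=
  sizesLoopB attributes (conditions.map PySem.Set.ofList)
    (PySem.List.pyRange 1 ((attributes.length : Int) + 1) 1)

-- ===== PRECONDITION & SPEC =====
def Spec_reducts_from_conditions (attributes : List Int) (conditions : List (List Int)) (out : List (List Int)) : Prop := out = reducts_from_conditions_alt attributes conditions
instance (attributes : List Int) (conditions : List (List Int)) (out : List (List Int)) : Decidable (Spec_reducts_from_conditions attributes conditions out) := by unfold Spec_reducts_from_conditions; infer_instance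

-- ===== CLAIM (what is proved, stated in full; the proofs are below) =====
def Claim_equal_reducts_from_conditions : Prop := ∀ (attributes : List Int) (conditions : List (List Int)), Dom_reducts_from_conditions attributes conditions → Spec_reducts_from_conditions attributes conditions (reducts_from_conditions attributes conditions)

-- ===== LEMMAS AND PROOFS =====

-- the condition of stepA's if, as a named predicate for the fold lemmas
def pA (conditions : List (List Int)) (size : Int) (subset : List Int) : Bool :=
  (subset.length : Int) == size && satisfiesConditionA conditions subset

theorem stepA_pA (size : Int) (conditions : List (List Int))
    (st : Int × List (List Int)) (subset : List Int) :
    stepA size conditions st subset =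
      if pA conditions size subset then
        if size < st.1 then (size, [PySem.Set.ofList subset])
        else if size = st.1 then (st.1, st.2 ++ [PySem.Set.ofList subset])
        else st
      else st := rfl

-- every combination emitted below `cur` is strictly longer than `cur`
theorem combineTailA_length (s : List Int) : ∀ (cur : List Int) (c : List Int),
    c ∈ combineTailA cur s → cur.length < c.length := by
  induction s with
  | nil => intro cur c h; simp [combineTailA] at h
  | cons a rest ih =>
    intro cur c h
    simp only [combineTailA, List.mem_append, List.mem_cons] at h
    rcases h with (h | h) | h
    · subst h; simp
    · have := ih (cur ++ [a]) c h; simp at this; omega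
    · exact ih cur c h

theorem issubset_ofList (t s : List Int) :
    PySem.Set.issubset (PySem.Set.ofList t) s = PySem.Set.issubset t s := by
  rw [Bool.eq_iff_iff]
  simp [PySem.Set.issubset, List.all_eq_true, PySem.Set.mem_ofList]

theorem all_const {α : Type} (l : List α) (b : Bool) : l.all (fun _ => b) = (l.isEmpty || b) := by
  cases l with
  | nil => simp
  | cons a t => simp; cases b <;> simp

-- B's ok over copied condition sets is A's (shadowed) satisfies_condition
theorem sat_eq (conds : List (List Int)) (c : List Int) :
    okB (conds.map PySem.Set.ofList) c = satisfiesConditionA conds c := by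
  simp only [okB, satisfiesConditionA, List.any_map, List.isEmpty_map, all_const]
  rw [Bool.or_comm]
  simp [Function.comp_def, issubset_ofList]

theorem combosB_empty (xs : List Int) (k : Nat) (h : xs.length < k + 1) :
    combosB xs (k + 1) = [] := by
  rw [combosB, PySem.List.pyRange_one_eq_nil (by omega)]
  rfl

theorem combosB_zero (xs : List Int) : combosB xs 0 = [[]] := rfl

-- head recursion for combos: combinations containing the head first, then the rest
theorem combosB_cons (a : Int) (rest : List Int) (k : Nat) :
    combosB (a :: rest) (k + 1) = (combosB rest k).map (a :: ·) ++ combosB rest (k + 1) := by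
  by_cases h : rest.length < k
  · have h1 : combosB (a :: rest) (k + 1) = [] := combosB_empty _ _ (by simp; omega)
    have h3 : combosB rest (k + 1) = [] := combosB_empty _ _ (by omega)
    cases k with
    | zero => omega
    | succ j =>
      have h2 : combosB rest (j + 1) = [] := combosB_empty _ _ (by omega)
      rw [h1, h2, h3]; rfl
  · have h' : k ≤ rest.length := by omega
    conv_lhs => rw [combosB]
    have hb : ((a :: rest).length : Int) - ((k : Int) + 1) + 1
        = ((rest.length - k : Nat) : Int) + 1 := by
      simp; omega
    rw [hb, PySem.List.pyRange_one_cons (by omega)]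
    simp only [List.flatMap_cons]
    have hhead : List.map (fun r => (a :: rest).getD (Int.toNat 0) 0 :: r)
        (combosB (List.drop (Int.toNat 0 + 1) (a :: rest)) k)
        = List.map (fun x => a :: x) (combosB rest k) := rfl
    have htail : List.flatMap
        (fun i => List.map (fun r => (a :: rest).getD i.toNat 0 :: r)
          (combosB (List.drop (i.toNat + 1) (a :: rest)) k))
        (PySem.List.pyRange (0 + 1) (((rest.length - k : Nat) : Int) + 1))
        = combosB rest (k + 1) := by
      conv_rhs => rw [combosB]
      have hb2 : ((rest.length : Int)) - ((k : Int) + 1) + 1 = ((rest.length - k : Nat) : Int) := by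
        omega
      rw [hb2, PySem.List.pyRange_one, PySem.List.pyRange_one]
      have e1 : ((((rest.length - k : Nat) : Int) + 1) - (0 + 1)).toNat = rest.length - k := by
        omega
      have e2 : (((rest.length - k : Nat) : Int) - 0).toNat = rest.length - k := by omega
      rw [e1, e2, List.flatMap_map, List.flatMap_map]
      apply List.flatMap_congr
      intro t _
      have ht : ((0 + 1 : Int) + (t : Int)).toNat = t + 1 := by omega
      have ht0 : ((0 : Int) + (t : Int)).toNat = t := by omega
      simp only [ht, ht0, List.drop_succ_cons, List.getD_cons_succ]
    rw [hhead, htail]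

-- DFS pre-order filtered to one exact length = per-size lexicographic combinations
theorem filter_combineTailA (s : List Int) : ∀ (cur : List Int) (k : Nat),
    (combineTailA cur s).filter (fun c => c.length == cur.length + (k + 1))
      = (combosB s (k + 1)).map (fun t => cur ++ t) := by
  induction s with
  | nil =>
    intro cur k
    rw [combosB_empty [] k (by simp)]
    rfl
  | cons a rest ih =>
    intro cur k
    rw [combosB_cons]
    simp only [combineTailA, List.filter_append, List.filter_cons]
    cases k with
    | zero =>
      have hc1 : ((cur ++ [a]).length == cur.length + (0 + 1)) = true := by simp
      have h2 : (combineTailA (cur ++ [a]) rest).filter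
          (fun c => c.length == cur.length + (0 + 1)) = [] := by
        rw [List.filter_eq_nil_iff]
        intro c hc
        have := combineTailA_length rest (cur ++ [a]) c hc
        simp at this ⊢
        omega
      rw [hc1]
      simp [h2, ih cur 0, combosB_zero]
    | succ j =>
      have hc1 : ((cur ++ [a]).length == cur.length + (j + 1 + 1)) = false := by simp
      have h2 : (combineTailA (cur ++ [a]) rest).filter
          (fun c => c.length == cur.length + (j + 1 + 1))
          = (combosB rest (j + 1)).map (fun t => (cur ++ [a]) ++ t) := by
        have harith : cur.length + (j + 1 + 1) = (cur ++ [a]).length + (j + 1) := by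
          simp; omega
        rw [harith]
        exact ih (cur ++ [a]) j
      have hfun : (fun t : List Int => (cur ++ [a]) ++ t) = (fun t => cur ++ (a :: t)) := by
        funext t; simp
      rw [hc1, h2, hfun, ih cur (j + 1)]
      simp [List.map_map, Function.comp]

-- A's inner fold once min size equals the current size: every hit is appended
theorem foldA_eq (z : Int) (conds : List (List Int)) (L : List (List Int)) :
    ∀ (r : List (List Int)),
    L.foldl (stepA z conds) (z, r) = (z, r ++ (L.filter (pA conds z)).map PySem.Set.ofList) := by
  induction L with
  | nil => intro r; simp
  | cons c L ih =>
    intro r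
    simp only [List.foldl_cons, List.filter_cons]
    by_cases h : pA conds z c = true
    · have hs : stepA z conds (z, r) c = (z, r ++ [PySem.Set.ofList c]) := by
        rw [stepA_pA, if_pos h]; simp
      rw [hs, ih, h]
      simp
    · have hs : stepA z conds (z, r) c = (z, r) := by
        rw [stepA_pA, if_neg h]
      rw [hs, ih]
      simp [h]

-- A's inner fold from the initial state (m, []) with z ≤ m: the first hit resets
theorem foldA_le (z : Int) (conds : List (List Int)) (L : List (List Int)) (m : Int)
    (hzm : z ≤ m) :
    L.foldl (stepA z conds) (m, [])
      = if (L.filter (pA conds z)) = [] then (m, ([] : List (List Int)))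
        else (z, (L.filter (pA conds z)).map PySem.Set.ofList) := by
  induction L with
  | nil => simp
  | cons c L ih =>
    simp only [List.foldl_cons, List.filter_cons]
    by_cases h : pA conds z c = true
    · have hs : stepA z conds (m, []) c = (z, [PySem.Set.ofList c]) := by
        rw [stepA_pA, if_pos h]
        rcases lt_or_eq_of_le hzm with hlt | heq
        · simp [hlt]
        · subst heq; simp
      rw [hs, foldA_eq, h]
      simp
    · have hs : stepA z conds (m, []) c = (m, []) := by
        rw [stepA_pA, if_neg h]
      rw [hs, ih]
      simp [h]

theorem beq_natCast (m n : Nat) : (((m : Int)) == ((n : Int))) = (m == n) := by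
  by_cases h : m = n <;> simp [h]

-- A's filtered DFS list at size z equals B's filtered per-size combinations
theorem filterAB (attrs : List Int) (conds : List (List Int)) (z : Int) (hz : 1 ≤ z) :
    (generateAllCombinations attrs).filter (pA conds z)
      = (combosB attrs z.toNat).filter (okB (conds.map PySem.Set.ofList)) := by
  obtain ⟨k, hk⟩ : ∃ k, z.toNat = k + 1 := ⟨z.toNat - 1, by omega⟩
  have hz' : z = ((k + 1 : Nat) : Int) := by omega
  have hpa : pA conds z = fun c =>
      satisfiesConditionA conds c && (c.length == k + 1) := by
    funext c
    rw [pA, hz', beq_natCast, Bool.and_comm]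
  have hok : okB (conds.map PySem.Set.ofList) = satisfiesConditionA conds := by
    funext c; exact sat_eq conds c
  have hgen : (combineTailA [] attrs).filter (fun c => c.length == k + 1)
      = combosB attrs (k + 1) := by
    have := filter_combineTailA attrs [] k
    simpa using this
  rw [hpa, hk, hok, ← List.filter_filter, generateAllCombinations, hgen]

-- the two size loops agree step by step
theorem loop_eq (attrs : List Int) (conds : List (List Int)) : ∀ (zs : List Int),
    (∀ z ∈ zs, 1 ≤ z ∧ z ≤ (attrs.length : Int)) →
    sizesLoopA attrs conds zs ((attrs.length : Int), [])
      = sizesLoopB attrs (conds.map PySem.Set.ofList) zs := by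
  intro zs
  induction zs with
  | nil => intro _; rfl
  | cons z rest ih =>
    intro hz
    obtain ⟨h1, h2⟩ := hz z (by simp)
    simp only [sizesLoopA, sizesLoopB]
    rw [foldA_le z conds _ _ h2, filterAB attrs conds z h1]
    by_cases hF : (combosB attrs z.toNat).filter (okB (conds.map PySem.Set.ofList)) = []
    · simp only [hF, List.map_nil, ne_eq, not_true_eq_false, if_false]
      simp
      exact ih (fun w hw => hz w (by simp [hw]))
    · simp [hF]

-- ===== VERDICT (by name: the statement is the Claim_ definition above) =====
theorem reducts_from_conditions_spec : Claim_equal_reducts_from_conditions := by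
  intro attrs conds _
  unfold Spec_reducts_from_conditions reducts_from_conditions reducts_from_conditions_alt
  apply loop_eq
  intro z hzmem
  rw [PySem.List.mem_pyRange_one] at hzmem
  exact ⟨hzmem.1, by omega⟩
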